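-- pv_equiv track=rewrite | github.com/deker104/voter-bot | report.py | topk_counts
-- ===== SOURCE A (Python) =====
-- from typing import Dict, List, Sequence, Tuple, Optional
--
-- def topk_counts(ballots: Sequence[Sequence[int]], candidate_ids: Sequence[int], k: int) -> Dict[int, int]:
--     out = {cid: 0 for cid in candidate_ids}
--     for b in ballots:
--         top = set(b[:k])
--         for cid in top:
--             if cid in out:
--                 out[cid] += 1
--     return out
-- ===== SOURCE B (Python) =====
-- def topk_counts(ballots, candidate_ids, k):
--     # Per-candidate counting: count ballots whose first-k slice contains the candidate.
--     return {cid: sum(1 for b in ballots if cid in b[:k]) for cid in candidate_ids}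
-- ===== Notes on version B (the rewrite author's own statement) =====
-- stated objective: alternative
-- what changed: Replaces A's single pass over ballots that builds a top-k set per ballot and increments a pre-zeroed dict with a per-candidate re-scan: for each candidate id, count the ballots whose first-k slice contains it, building the dict directly from these counts.
import Mathlib
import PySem

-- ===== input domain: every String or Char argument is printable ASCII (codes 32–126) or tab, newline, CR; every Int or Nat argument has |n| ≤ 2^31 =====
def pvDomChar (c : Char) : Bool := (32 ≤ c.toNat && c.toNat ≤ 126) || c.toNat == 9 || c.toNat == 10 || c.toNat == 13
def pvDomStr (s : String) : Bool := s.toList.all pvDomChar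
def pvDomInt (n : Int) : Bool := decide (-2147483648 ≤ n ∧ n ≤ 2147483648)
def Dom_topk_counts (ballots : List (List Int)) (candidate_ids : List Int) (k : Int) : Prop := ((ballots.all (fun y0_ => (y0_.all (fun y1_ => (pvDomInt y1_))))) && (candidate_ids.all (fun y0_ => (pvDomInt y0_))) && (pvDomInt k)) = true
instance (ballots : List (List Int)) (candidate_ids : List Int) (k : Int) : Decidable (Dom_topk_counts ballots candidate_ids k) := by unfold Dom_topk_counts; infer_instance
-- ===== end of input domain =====

-- B replaces A's single forward pass (per-ballot top-k set, incrementing a pre-zeroed dict)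
-- with a per-candidate re-scan of the ballots; alternative decomposition, not faster.

-- ===== PORT A =====
def topk_counts (ballots : List (List Int)) (candidate_ids : List Int) (k : Int) : List (Int × Int) :=
  -- out = {cid: 0 for cid in candidate_ids}
  let out : PySem.Dict Int Int := candidate_ids.foldl (fun d cid => d.insert cid 0) PySem.Dict.empty
  -- for b in ballots: top = set(b[:k]); for cid in top: if cid in out: out[cid] += 1
  -- (the set iteration order cannot affect the resulting dict: each present key gains at most 1)
  let out := ballots.foldl (fun d b =>
    let top : PySem.Set Int := PySem.Set.ofList (PySem.List.slice b none (some k))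
    top.foldl (fun d cid => if d.contains cid then d.modify cid 0 (· + 1) else d) d) out
  out.items

-- ===== PORT B =====
def topk_counts_alt (ballots : List (List Int)) (candidate_ids : List Int) (k : Int) : List (Int × Int) :=
  -- {cid: sum(1 for b in ballots if cid in b[:k]) for cid in candidate_ids}
  (candidate_ids.foldl (fun d cid =>
      d.insert cid (ballots.foldl (fun acc b =>
        if (PySem.List.slice b none (some k)).contains cid then acc + 1 else acc) 0))
    (PySem.Dict.empty : PySem.Dict Int Int)).items

-- ===== PRECONDITION & SPEC =====
def Spec_topk_counts (ballots : List (List Int)) (candidate_ids : List Int) (k : Int) (out : List (Int × Int)) : Prop := out = topk_counts_alt ballots candidate_ids k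
instance (ballots : List (List Int)) (candidate_ids : List Int) (k : Int) (out : List (Int × Int)) : Decidable (Spec_topk_counts ballots candidate_ids k out) := by unfold Spec_topk_counts; infer_instance

-- ===== CLAIM (what is proved, stated in full; the proofs are below) =====
def Claim_equal_topk_counts : Prop := ∀ (ballots : List (List Int)) (candidate_ids : List Int) (k : Int), Dom_topk_counts ballots candidate_ids k → Spec_topk_counts ballots candidate_ids k (topk_counts ballots candidate_ids k)

-- ===== LEMMAS AND PROOFS =====

-- B's per-candidate count, as B computes it
def pvCnt (ballots : List (List Int)) (k : Int) (c : Int) : Int :=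
  ballots.foldl (fun acc b =>
    if (PySem.List.slice b none (some k)).contains c then acc + 1 else acc) 0

-- A's inner loop over one ballot's top-set
def pvInner (d : PySem.Dict Int Int) (t : List Int) : PySem.Dict Int Int :=
  t.foldl (fun d cid => if d.contains cid then d.modify cid 0 (· + 1) else d) d

-- A's outer step over one ballot
def pvStep (k : Int) (d : PySem.Dict Int Int) (b : List Int) : PySem.Dict Int Int :=
  pvInner d (PySem.Set.ofList (PySem.List.slice b none (some k)))

lemma pvCnt_eq (bs : List (List Int)) (k c : Int) :
    pvCnt bs k c = ((bs.countP (fun b => (PySem.List.slice b none (some k)).contains c)) : Int) := by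
  simpa [pvCnt] using
    PySem.List.foldl_if_add_one (fun b => (PySem.List.slice b none (some k)).contains c) bs 0

lemma pvCnt_cons (b : List Int) (bs : List (List Int)) (k c : Int) :
    pvCnt (b :: bs) k c
      = (if (PySem.List.slice b none (some k)).contains c then 1 else 0) + pvCnt bs k c := by
  rw [pvCnt_eq, pvCnt_eq, List.countP_cons]
  split_ifs <;> simp_all <;> omega

lemma pvInner_keys (t : List Int) (d : PySem.Dict Int Int) : (pvInner d t).keys = d.keys := by
  induction t generalizing d with
  | nil => rfl
  | cons a t ih =>
    simp only [pvInner, List.foldl_cons] at *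
    rw [ih]
    split_ifs with h
    · rw [PySem.Dict.keys_modify, PySem.Dict.keys_insert_of_contains]
      exact h
    · rfl

lemma pvInner_contains (t : List Int) (d : PySem.Dict Int Int) (c : Int) :
    (pvInner d t).contains c = d.contains c := by
  rw [PySem.Dict.contains_eq_decide_mem_keys, PySem.Dict.contains_eq_decide_mem_keys,
    pvInner_keys]

lemma pvInner_getD (t : List Int) (d : PySem.Dict Int Int) (c : Int) (hnd : t.Nodup) :
    (pvInner d t).getD c 0
      = d.getD c 0 + (if d.contains c = true ∧ c ∈ t then 1 else 0) := by
  induction t generalizing d with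
  | nil => simp [pvInner]
  | cons a t ih =>
    rcases List.nodup_cons.mp hnd with ⟨ha, hnd'⟩
    simp only [pvInner, List.foldl_cons] at *
    rw [ih _ hnd']
    by_cases hda : d.contains a = true
    · simp only [hda, if_true]
      simp only [PySem.Dict.getD_modify, PySem.Dict.contains_modify]
      by_cases hca : c = a
      · subst hca
        simp [hda, ha]
      · simp [hca] <;> omega
    · simp only [hda, if_false]
      by_cases hca : c = a
      · subst hca
        simp [hda]
      · simp [hca]

lemma pvA_keys (bs : List (List Int)) (k : Int) (d : PySem.Dict Int Int) :
    (bs.foldl (pvStep k) d).keys = d.keys := by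
  induction bs generalizing d with
  | nil => rfl
  | cons b bs ih =>
    simp only [List.foldl_cons]
    rw [ih, pvStep, pvInner_keys]

lemma pvA_getD (bs : List (List Int)) (k : Int) (d : PySem.Dict Int Int) (c : Int) :
    (bs.foldl (pvStep k) d).getD c 0
      = d.getD c 0 + (if d.contains c = true then pvCnt bs k c else 0) := by
  induction bs generalizing d with
  | nil => simp [pvCnt]
  | cons b bs ih =>
    simp only [List.foldl_cons]
    rw [ih, pvCnt_cons]
    rw [pvStep, pvInner_contains, pvInner_getD _ _ _ (PySem.Set.nodup_ofList _)]
    have hmem : c ∈ PySem.Set.ofList (PySem.List.slice b none (some k)) ↔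
        c ∈ PySem.List.slice b none (some k) := PySem.Set.mem_ofList _ _
    by_cases hc : d.contains c = true
    · by_cases hs : c ∈ PySem.List.slice b none (some k)
      · have hs' : (PySem.List.slice b none (some k)).contains c = true := by simpa using hs
        simp only [hc, hs', hmem, hs, true_and, if_true]
        ring
      · have hs' : ¬ (PySem.List.slice b none (some k)).contains c = true := by simpa using hs
        simp [hc, hs', hmem, hs]
    · simp [hc]

lemma pvB_getD (l : List Int) (d : PySem.Dict Int Int) (f : Int → Int) (c : Int) :
    (l.foldl (fun d cid => d.insert cid (f cid)) d).getD c 0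
      = if c ∈ l then f c else d.getD c 0 := by
  induction l generalizing d with
  | nil => simp
  | cons a l ih =>
    simp only [List.foldl_cons]
    rw [ih]
    by_cases hc : c ∈ l
    · simp [hc]
    · by_cases hca : c = a
      · subst hca; simp [hc, PySem.Dict.getD_insert]
      · simp [hc, hca, PySem.Dict.getD_insert]

lemma pvIns_keys (l : List Int) (f : Int → Int) :
    ((l.foldl (fun d cid => d.insert cid (f cid)) (PySem.Dict.empty : PySem.Dict Int Int))).keys
      = PySem.Set.ofList l := by
  rw [PySem.Dict.keys_foldl_insert_key l (fun x => x) (fun d x => f x) PySem.Dict.empty]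
  simp [PySem.Set.update, PySem.Set.ofList_eq_foldl]

-- ===== VERDICT (by name: the statement is the Claim_ definition above) =====
theorem topk_counts_spec : Claim_equal_topk_counts := by
  intro ballots candidate_ids k _
  simp only [Spec_topk_counts, topk_counts, topk_counts_alt]
  have hzero : (fun d cid => PySem.Dict.insert d cid 0)
      = (fun (d : PySem.Dict Int Int) cid => d.insert cid ((fun _ => (0 : Int)) cid)) := rfl
  set f : Int → Int := fun cid => pvCnt ballots k cid with hf
  have hBfun : (fun (d : PySem.Dict Int Int) cid =>
      d.insert cid (ballots.foldl (fun acc b =>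
        if (PySem.List.slice b none (some k)).contains cid then acc + 1 else acc) 0))
      = (fun (d : PySem.Dict Int Int) cid => d.insert cid (f cid)) := rfl
  rw [hBfun]
  -- both sides are dicts with keys = ofList candidate_ids; compare items via getD
  have hAkeys : (ballots.foldl (pvStep k)
      (candidate_ids.foldl (fun d cid => d.insert cid 0) PySem.Dict.empty)).keys
      = PySem.Set.ofList candidate_ids := by
    rw [pvA_keys, hzero, pvIns_keys]
  have hBkeys := pvIns_keys candidate_ids f
  have hnd : (PySem.Set.ofList candidate_ids).Nodup := PySem.Set.nodup_ofList _
  have hstep : (fun (d : PySem.Dict Int Int) b =>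
      pvInner d (PySem.Set.ofList (PySem.List.slice b none (some k)))) = pvStep k := rfl
  rw [show (fun (d : PySem.Dict Int Int) b =>
        (PySem.Set.ofList (PySem.List.slice b none (some k))).foldl
          (fun d cid => if d.contains cid then d.modify cid 0 (· + 1) else d) d)
      = pvStep k from rfl]
  rw [PySem.Dict.items_eq_map_keys _ (hAkeys ▸ hnd) 0,
      PySem.Dict.items_eq_map_keys _ (hBkeys ▸ hnd) 0,
      hAkeys, hBkeys]
  apply List.map_congr_left
  intro c hc
  have hcmem : c ∈ candidate_ids := (PySem.Set.mem_ofList _ _).mp hc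
  have hA : (ballots.foldl (pvStep k)
      (candidate_ids.foldl (fun d cid => d.insert cid 0) PySem.Dict.empty)).getD c 0 = f c := by
    rw [pvA_getD]
    rw [hzero, pvB_getD]
    have hcontains : (candidate_ids.foldl (fun d cid => d.insert cid 0)
        (PySem.Dict.empty : PySem.Dict Int Int)).contains c = true := by
      rw [PySem.Dict.contains_eq_decide_mem_keys, hzero, pvIns_keys]
      simp [(PySem.Set.mem_ofList _ _).mpr hcmem]
    simp [hcmem, hcontains, hf, pvCnt]
  have hB : ((candidate_ids.foldl (fun d cid => d.insert cid (f cid))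
      (PySem.Dict.empty : PySem.Dict Int Int))).getD c 0 = f c := by
    rw [pvB_getD]; simp [hcmem]
  rw [hA, hB]
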